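-- pv_equiv track=rewrite | github.com/dermot-murphy/CStyleCheck | src/cstylecheck.py | _classify_tokens
-- ===== SOURCE A (Python) =====
-- _SIGN_SIGNED   = "signed"
--
-- _SIGN_UNSIGNED = "unsigned"
--
-- _SIGN_UNKNOWN  = "unknown"
--
-- _UNSIGNED_TYPES: set = {
--     "uint8_t",  "uint16_t",  "uint32_t",  "uint64_t",
--     "uint8",    "uint16",    "uint32",    "uint64",
--     "bool", "_Bool", "size_t", "uintptr_t", "uintmax_t",
-- }
--
-- _SIGNED_TYPES: set = {
--     "int8_t",   "int16_t",   "int32_t",   "int64_t",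
--     "int8",     "int16",     "int32",     "int64",
--     "sint8",    "sint16",    "sint32",    "sint64",
--     "int", "short", "long",
--     # plain char: implementation-defined, but most embedded compilers make
--     # it signed; we treat it as signed by default (configurable via YAML)
--     "char",
-- }
--
-- def _classify_tokens(tokens: list) -> str:
--     """Return sign classification from a list of type/qualifier tokens."""
--     tset = set(tokens)
--     if "unsigned" in tset:
--         return _SIGN_UNSIGNED
--     if "signed" in tset:
--         return _SIGN_SIGNED
--     for t in tokens:
--         if t in _UNSIGNED_TYPES:
--             return _SIGN_UNSIGNED
--         if t in _SIGNED_TYPES: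
--             return _SIGN_SIGNED
--     return _SIGN_UNKNOWN
-- ===== SOURCE B (Python) =====
-- _SIGN_SIGNED   = "signed"
-- _SIGN_UNSIGNED = "unsigned"
-- _SIGN_UNKNOWN  = "unknown"
--
-- _UNSIGNED_TYPES: set = {
--     "uint8_t",  "uint16_t",  "uint32_t",  "uint64_t",
--     "uint8",    "uint16",    "uint32",    "uint64",
--     "bool", "_Bool", "size_t", "uintptr_t", "uintmax_t",
-- }
--
-- _SIGNED_TYPES: set = {
--     "int8_t",   "int16_t",   "int32_t",   "int64_t",
--     "int8",     "int16",     "int32",     "int64",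
--     "sint8",    "sint16",    "sint32",    "sint64",
--     "int", "short", "long",
--     "char",
-- }
--
-- def _score(i, t):
--     """Priority of one token: keyword 'unsigned' beats all (0), then keyword
--     'signed' (1), then known type tokens ranked by position (2 + i) so the
--     earliest type wins; unknown tokens score nothing."""
--     if t == "unsigned":
--         return (0, _SIGN_UNSIGNED)
--     if t == "signed":
--         return (1, _SIGN_SIGNED)
--     if t in _UNSIGNED_TYPES:
--         return (2 + i, _SIGN_UNSIGNED)
--     if t in _SIGNED_TYPES:
--         return (2 + i, _SIGN_SIGNED)
--     return None
--
-- def _classify_tokens(tokens: list) -> str: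
--     """Score-and-minimise: classify = sign of the lowest-priority-number candidate."""
--     cands = [c for c in (_score(i, t) for i, t in enumerate(tokens)) if c is not None]
--     if not cands:
--         return _SIGN_UNKNOWN
--     return min(cands, key=lambda c: c[0])[1]
-- ===== Notes on version B (the rewrite author's own statement) =====
-- stated objective: alternative
-- what changed: Replaces A's set() build plus keyword membership tests plus first-match early-return scan with a score-and-minimise algorithm: every token is mapped to a numeric priority (keyword 'unsigned' 0, keyword 'signed' 1, known type at index i gets 2+i), the scored candidates are collected and the sign of the minimum-priority candidate is returned.
import Mathlib
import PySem

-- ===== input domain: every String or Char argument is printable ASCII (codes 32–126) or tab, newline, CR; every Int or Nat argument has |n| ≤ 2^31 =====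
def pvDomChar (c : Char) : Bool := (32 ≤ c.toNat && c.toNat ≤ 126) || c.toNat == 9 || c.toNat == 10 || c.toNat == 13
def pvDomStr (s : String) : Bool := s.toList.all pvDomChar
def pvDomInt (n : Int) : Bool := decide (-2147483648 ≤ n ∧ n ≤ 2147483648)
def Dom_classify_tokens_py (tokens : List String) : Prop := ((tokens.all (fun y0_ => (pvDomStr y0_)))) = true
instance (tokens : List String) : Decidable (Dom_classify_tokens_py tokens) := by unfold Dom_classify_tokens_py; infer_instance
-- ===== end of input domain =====

-- B replaces A's staged membership tests and first-match scan with a different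
-- algorithm: score every token with a numeric priority and take the minimum
-- (objective: alternative, same asymptotic cost).

-- ===== PORT A =====
def pvUnsignedTypes : PySem.Set String :=
  PySem.Set.ofList ["uint8_t", "uint16_t", "uint32_t", "uint64_t",
    "uint8", "uint16", "uint32", "uint64",
    "bool", "_Bool", "size_t", "uintptr_t", "uintmax_t"]

def pvSignedTypes : PySem.Set String :=
  PySem.Set.ofList ["int8_t", "int16_t", "int32_t", "int64_t",
    "int8", "int16", "int32", "int64",
    "sint8", "sint16", "sint32", "sint64",
    "int", "short", "long", "char"]

-- A's final 'for t in tokens' loop with its two early returns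
def pvClassifyLoopA : List String → String
  | [] => "unknown"
  | t :: rest =>
      if PySem.Set.contains pvUnsignedTypes t then "unsigned"
      else if PySem.Set.contains pvSignedTypes t then "signed"
      else pvClassifyLoopA rest

def classify_tokens_py (tokens : List String) : String :=
  let tset : PySem.Set String := PySem.Set.ofList tokens
  if PySem.Set.contains tset "unsigned" then "unsigned"
  else if PySem.Set.contains tset "signed" then "signed"
  else pvClassifyLoopA tokens

-- ===== PORT B =====
-- Source B's _score(i, t): the priority of one (index, token) pair
def pvScore (p : Int × String) : Option (Int × String) :=
  if p.2 == "unsigned" then some (0, "unsigned")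
  else if p.2 == "signed" then some (1, "signed")
  else if PySem.Set.contains pvUnsignedTypes p.2 then some (2 + p.1, "unsigned")
  else if PySem.Set.contains pvSignedTypes p.2 then some (2 + p.1, "signed")
  else none

def classify_tokens_py_alt (tokens : List String) : String :=
  let cands := (PySem.List.enumerate tokens).filterMap pvScore
  match PySem.List.min? cands (fun c => c.1) with
  | none => "unknown"
  | some c => c.2

-- ===== PRECONDITION & SPEC =====
def Spec_classify_tokens_py (tokens : List String) (out : String) : Prop := out = classify_tokens_py_alt tokens
instance (tokens : List String) (out : String) : Decidable (Spec_classify_tokens_py tokens out) := by unfold Spec_classify_tokens_py; infer_instance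

-- ===== CLAIM (what is proved, stated in full; the proofs are below) =====
def Claim_equal_classify_tokens_py : Prop := ∀ (tokens : List String), Dom_classify_tokens_py tokens → Spec_classify_tokens_py tokens (classify_tokens_py tokens)

-- ===== LEMMAS AND PROOFS =====

-- proof-side helper: the sign of the first token in either type set (A's loop, minus the early exit)
def pvFirstSign : List String → Option String
  | [] => none
  | t :: rest =>
      if PySem.Set.contains pvUnsignedTypes t then some "unsigned"
      else if PySem.Set.contains pvSignedTypes t then some "signed"
      else pvFirstSign rest

-- proof-side helper: B's candidate list from an arbitrary start index
def pvCands (s : Int) (tokens : List String) : List (Int × String) :=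
  (PySem.List.enumerate tokens s).filterMap pvScore

theorem pvLoopA_eq_firstSign (tokens : List String) :
    pvClassifyLoopA tokens = (pvFirstSign tokens).getD "unknown" := by
  induction tokens with
  | nil => rfl
  | cons t rest ih =>
    simp only [pvClassifyLoopA, pvFirstSign]
    split <;> [rfl; skip] <;> split <;> [rfl; exact ih]

theorem pvCands_nil (s : Int) : pvCands s [] = [] := rfl

theorem pvCands_cons (s : Int) (t : String) (rest : List String) :
    pvCands s (t :: rest) = ((pvScore (s, t)).toList ++ pvCands (s + 1) rest) := by
  simp [pvCands, PySem.List.enumerate_cons, List.filterMap_cons]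
  cases pvScore (s, t) <;> simp

-- rank facts: every candidate has a nonnegative rank; rank 0 candidates come only
-- from the keyword "unsigned", rank 1 only from the keyword "signed"
theorem pvCands_ranks (tokens : List String) : ∀ s : Int, 0 ≤ s →
    ∀ c ∈ pvCands s tokens, 0 ≤ c.1 ∧
      (c.1 = 0 → c.2 = "unsigned" ∧ "unsigned" ∈ tokens) ∧
      (c.1 = 1 → c.2 = "signed" ∧ "signed" ∈ tokens) := by
  induction tokens with
  | nil => intro s _ c hc; simp [pvCands_nil] at hc
  | cons t rest ih =>
    intro s hs c hc
    rw [pvCands_cons] at hc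
    rcases List.mem_append.1 hc with hc | hc
    · unfold pvScore at hc
      split_ifs at hc with h1 h2 h3 h4 <;> simp_all <;> omega
    · have := ih (s + 1) (by omega) c hc
      refine ⟨this.1, fun h0 => ⟨(this.2.1 h0).1, ?_⟩, fun h1 => ⟨(this.2.2 h1).1, ?_⟩⟩
      · exact List.mem_cons_of_mem _ (this.2.1 h0).2
      · exact List.mem_cons_of_mem _ (this.2.2 h1).2

theorem pvCands_mem_unsigned (tokens : List String) (h : "unsigned" ∈ tokens) :
    ∀ s : Int, (0, "unsigned") ∈ pvCands s tokens := by
  induction tokens with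
  | nil => simp at h
  | cons t rest ih =>
    intro s
    rw [pvCands_cons]
    rcases List.mem_cons.1 h with h | h
    · subst h; simp [pvScore]
    · exact List.mem_append_right _ (ih h (s + 1))

theorem pvCands_mem_signed (tokens : List String) (h : "signed" ∈ tokens) :
    ∀ s : Int, (1, "signed") ∈ pvCands s tokens ∨ (0, "unsigned") ∈ pvCands s tokens := by
  induction tokens with
  | nil => simp at h
  | cons t rest ih =>
    intro s
    rw [pvCands_cons]
    rcases List.mem_cons.1 h with h | h
    · subst h; left; simp [pvScore]
    · rcases ih h (s + 1) with h' | h'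
      · exact Or.inl (List.mem_append_right _ h')
      · exact Or.inr (List.mem_append_right _ h')

-- without the keywords every candidate has rank ≥ 2 + s
theorem pvCands_lb (tokens : List String)
    (hU : "unsigned" ∉ tokens) (hS : "signed" ∉ tokens) :
    ∀ s : Int, ∀ c ∈ pvCands s tokens, 2 + s ≤ c.1 := by
  induction tokens with
  | nil => intro s c hc; simp [pvCands_nil] at hc
  | cons t rest ih =>
    have ht1 : t ≠ "unsigned" := fun h => hU (by simp [h])
    have ht2 : t ≠ "signed" := fun h => hS (by simp [h])
    have hU' : "unsigned" ∉ rest := fun h => hU (List.mem_cons_of_mem _ h)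
    have hS' : "signed" ∉ rest := fun h => hS (List.mem_cons_of_mem _ h)
    intro s c hc
    rw [pvCands_cons] at hc
    rcases List.mem_append.1 hc with hc | hc
    · unfold pvScore at hc
      split_ifs at hc with h1 h2 h3 h4 <;> simp_all
    · have := ih hU' hS' (s + 1) c hc
      omega

-- without the keywords the candidate list is headed by the first type's sign,
-- and the head's rank is strictly below every later rank
theorem pvCands_nokw (tokens : List String)
    (hU : "unsigned" ∉ tokens) (hS : "signed" ∉ tokens) :
    ∀ s : Int,
      (pvFirstSign tokens = none ∧ pvCands s tokens = []) ∨
      (∃ g j rest', pvFirstSign tokens = some g ∧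
        pvCands s tokens = (j, g) :: rest' ∧ ∀ c ∈ rest', j < c.1) := by
  induction tokens with
  | nil => intro s; exact Or.inl ⟨rfl, rfl⟩
  | cons t rest ih =>
    have ht1 : t ≠ "unsigned" := fun h => hU (by simp [h])
    have ht2 : t ≠ "signed" := fun h => hS (by simp [h])
    have hU' : "unsigned" ∉ rest := fun h => hU (List.mem_cons_of_mem _ h)
    have hS' : "signed" ∉ rest := fun h => hS (List.mem_cons_of_mem _ h)
    intro s
    rw [pvCands_cons]
    by_cases h3 : t ∈ pvUnsignedTypes
    · right
      refine ⟨"unsigned", 2 + s, pvCands (s + 1) rest, ?_, ?_, ?_⟩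
      · simp [pvFirstSign, PySem.Set.contains_iff, h3]
      · simp [pvScore, PySem.Set.contains_iff, ht1, ht2, h3]
      · intro c hc; have := pvCands_lb rest hU' hS' (s + 1) c hc; omega
    · by_cases h4 : t ∈ pvSignedTypes
      · right
        refine ⟨"signed", 2 + s, pvCands (s + 1) rest, ?_, ?_, ?_⟩
        · simp [pvFirstSign, PySem.Set.contains_iff, h3, h4]
        · simp [pvScore, PySem.Set.contains_iff, ht1, ht2, h3, h4]
        · intro c hc; have := pvCands_lb rest hU' hS' (s + 1) c hc; omega
      · have hskip : (pvScore (s, t)).toList = [] := by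
          simp [pvScore, PySem.Set.contains_iff, ht1, ht2, h3, h4]
        rw [hskip, List.nil_append]
        have hfs : pvFirstSign (t :: rest) = pvFirstSign rest := by
          simp [pvFirstSign, PySem.Set.contains_iff, h3, h4]
        rw [hfs]
        exact ih hU' hS' (s + 1)

theorem classify_tokens_py_spec : Claim_equal_classify_tokens_py := by
  intro tokens _
  unfold Spec_classify_tokens_py classify_tokens_py classify_tokens_py_alt
  have hcands : (PySem.List.enumerate tokens).filterMap pvScore = pvCands 0 tokens := rfl
  simp only [hcands, PySem.Set.contains_eq_listContains, PySem.Set.mem_ofList,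
    List.contains_eq_mem]
  by_cases hU : "unsigned" ∈ tokens
  · simp only [hU, decide_true, if_true]
    have hmem := pvCands_mem_unsigned tokens hU 0
    cases hm : PySem.List.min? (pvCands 0 tokens) (fun c => c.1) with
    | none =>
      rw [PySem.List.min?_eq_none_iff] at hm
      rw [hm] at hmem; simp at hmem
    | some m =>
      have h1 := PySem.List.min?_isMin hm _ hmem
      have h2 := (pvCands_ranks tokens 0 le_rfl m (PySem.List.min?_mem hm)).1
      have h0 : m.1 = 0 := by omega
      have := (pvCands_ranks tokens 0 le_rfl m (PySem.List.min?_mem hm)).2.1 h0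
      simp [this.1]
  · simp only [hU, decide_false, if_false]
    by_cases hS : "signed" ∈ tokens
    · simp only [hS, decide_true, if_true]
      have hmem : (1, "signed") ∈ pvCands 0 tokens := by
        rcases pvCands_mem_signed tokens hS 0 with h | h
        · exact h
        · exact absurd ((pvCands_ranks tokens 0 le_rfl _ h).2.1 rfl).2 hU
      cases hm : PySem.List.min? (pvCands 0 tokens) (fun c => c.1) with
      | none =>
        rw [PySem.List.min?_eq_none_iff] at hm
        rw [hm] at hmem; simp at hmem
      | some m =>
        have h1 := PySem.List.min?_isMin hm _ hmem
        have hr := pvCands_ranks tokens 0 le_rfl m (PySem.List.min?_mem hm)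
        have h0 : m.1 ≠ 0 := fun h => hU (hr.2.1 h).2
        have hm1 : m.1 = 1 := by omega
        simp [(hr.2.2 hm1).1]
    · simp only [hS, decide_false, if_false]
      rw [pvLoopA_eq_firstSign]
      rcases pvCands_nokw tokens hU hS 0 with ⟨hfs, hnil⟩ | ⟨g, j, rest', hfs, hcons, hlt⟩
      · simp [hfs, hnil, PySem.List.min?]
      · rw [hfs, hcons]
        cases hm : PySem.List.min? ((j, g) :: rest') (fun c => c.1) with
        | none => rw [PySem.List.min?_eq_none_iff] at hm; simp at hm
        | some m =>
          have h1 := PySem.List.min?_isMin hm _ (List.mem_cons_self)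
          rcases List.mem_cons.1 (PySem.List.min?_mem hm) with h | h
          · simp [h]
          · exact absurd h1 (by have := hlt m h; simp at h1 ⊢; omega)
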